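-- pv_equiv track=rewrite | github.com/squidistaken/imperative-programming | Block 2/Week 5/Tutorial 2/problem_2.py | count_grid_points
-- ===== SOURCE A (Python) =====
-- def count_grid_points(radius):
--     count = 0
--     x = 0
--     # O(n)
--     while x <= radius:
--         y = 1
--         # O(n)
--         while y <= radius:
--             if x * x + y * y <= radius * radius:
--                 count += 1
--             y += 1
--         x += 1
--
--     return 1 + (4 * count)
-- ===== SOURCE B (Python) =====
-- def count_grid_points(radius):
--     r2 = radius * radius
--     total = 0
--     for x in range(radius + 1):
--         n = r2 - x * x
--         # binary search for floor(sqrt(n)) in [0, radius]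
--         lo = 0
--         hi = radius
--         while lo < hi:
--             mid = (lo + hi + 1) // 2
--             if mid * mid <= n:
--                 lo = mid
--             else:
--                 hi = mid - 1
--         total += lo
--     return 1 + 4 * total
-- ===== Notes on version B (the rewrite author's own statement) =====
-- stated objective: faster
-- what changed: Replaces A's nested full scan over all (x,y) pairs by a single pass over x that computes each column height as floor(sqrt(r^2-x^2)) via binary search.
import Mathlib
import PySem

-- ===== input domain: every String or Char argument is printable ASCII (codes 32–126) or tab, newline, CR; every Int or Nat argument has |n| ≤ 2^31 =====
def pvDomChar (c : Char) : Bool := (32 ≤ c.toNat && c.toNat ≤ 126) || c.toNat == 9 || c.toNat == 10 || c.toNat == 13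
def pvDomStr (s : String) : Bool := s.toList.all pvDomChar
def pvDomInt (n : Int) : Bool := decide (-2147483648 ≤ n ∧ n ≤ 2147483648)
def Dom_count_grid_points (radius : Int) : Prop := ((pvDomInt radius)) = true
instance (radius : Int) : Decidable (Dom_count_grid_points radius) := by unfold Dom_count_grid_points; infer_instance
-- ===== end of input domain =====

-- B replaces A's nested scan over all (x,y) pairs by one pass over x that computes each
-- column height floor(sqrt(r^2-x^2)) by binary search; same return value.
-- While loops are ported as structural recursion on a fuel argument that bounds the iteration count (totality only).

-- ===== PORT A =====
-- inner while loop of A: y from its current value up to radius, counting feasible points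
def pvInnerA (radius x : Int) : Nat → Int → Int → Int
  | 0, _, count => count
  | fuel + 1, y, count =>
    if y ≤ radius then
      pvInnerA radius x fuel (y + 1) (if x * x + y * y ≤ radius * radius then count + 1 else count)
    else count

-- outer while loop of A
def pvOuterA (radius : Int) : Nat → Int → Int → Int
  | 0, _, count => count
  | fuel + 1, x, count =>
    if x ≤ radius then pvOuterA radius fuel (x + 1) (pvInnerA radius x radius.toNat 1 count)
    else count

def count_grid_points (radius : Int) : Int := 1 + (4 * pvOuterA radius (radius + 1).toNat 0 0)

-- ===== PORT B =====
-- B's inner while loop: binary search for floor(sqrt(n)) on the bracket [lo, hi]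
def pvIsqrtLoop (n : Int) : Nat → Int → Int → Int
  | 0, lo, _ => lo
  | fuel + 1, lo, hi =>
    if lo < hi then
      if (PySem.Int.floordiv (lo + hi + 1) 2) * (PySem.Int.floordiv (lo + hi + 1) 2) ≤ n then
        pvIsqrtLoop n fuel (PySem.Int.floordiv (lo + hi + 1) 2) hi
      else
        pvIsqrtLoop n fuel lo (PySem.Int.floordiv (lo + hi + 1) 2 - 1)
    else lo

def count_grid_points_alt (radius : Int) : Int :=
  1 + 4 * (PySem.List.pyRange 0 (radius + 1) 1).foldl
      (fun total x => total + pvIsqrtLoop (radius * radius - x * x) radius.toNat 0 radius) 0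

-- ===== PRECONDITION & SPEC =====
def Spec_count_grid_points (radius : Int) (out : Int) : Prop := out = count_grid_points_alt radius
instance (radius : Int) (out : Int) : Decidable (Spec_count_grid_points radius out) := by unfold Spec_count_grid_points; infer_instance

-- ===== CLAIM (what is proved, stated in full; the proofs are below) =====
def Claim_equal_count_grid_points : Prop := ∀ (radius : Int), Dom_count_grid_points radius → Spec_count_grid_points radius (count_grid_points radius)

-- ===== LEMMAS AND PROOFS =====

-- the number of z in [y, radius] with x^2 + z^2 ≤ radius^2, as a pure (non-accumulating) recursion
def pvCnt (radius x y : Int) : Int :=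
  if y ≤ radius then
    (if x * x + y * y ≤ radius * radius then 1 else 0) + pvCnt radius x (y + 1)
  else 0
termination_by (radius + 1 - y).toNat
decreasing_by omega

lemma pvInnerA_eq (radius x : Int) (fuel : Nat) (y count : Int)
    (hfuel : radius + 1 - y ≤ fuel) :
    pvInnerA radius x fuel y count = count + pvCnt radius x y := by
  induction fuel generalizing y count with
  | zero =>
    rw [pvInnerA, pvCnt, if_neg (by omega)]; ring
  | succ fuel ih =>
    rw [pvInnerA, pvCnt]
    split_ifs with h hf
    · rw [ih (y + 1) _ (by omega)]; ring
    · rw [ih (y + 1) _ (by omega)]; ring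
    · ring

lemma pvCnt_zero (radius x y : Int)
    (h : ∀ z, y ≤ z → z ≤ radius → radius * radius < x * x + z * z) :
    pvCnt radius x y = 0 := by
  rw [pvCnt]
  split_ifs with hy hf
  · exact absurd hf (not_le.mpr (h y le_rfl hy))
  · rw [pvCnt_zero radius x (y + 1) (fun z hz hzr => h z (by omega) hzr)]; ring
  · rfl
termination_by (radius + 1 - y).toNat
decreasing_by omega

lemma pvCnt_run (radius x m y : Int) (hm : m ≤ radius) (hy : y ≤ m + 1)
    (hfeas : ∀ z, y ≤ z → z ≤ m → x * x + z * z ≤ radius * radius)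
    (hinf : ∀ z, m < z → z ≤ radius → radius * radius < x * x + z * z) :
    pvCnt radius x y = m + 1 - y := by
  by_cases hym : y ≤ m
  · rw [pvCnt]
    have h1 : y ≤ radius := by omega
    have h2 : x * x + y * y ≤ radius * radius := hfeas y le_rfl hym
    rw [if_pos h1, if_pos h2,
      pvCnt_run radius x m (y + 1) hm (by omega)
        (fun z hz hzm => hfeas z (by omega) hzm) hinf]
    ring
  · have hy' : y = m + 1 := by omega
    rw [hy', pvCnt_zero radius x (m + 1) (fun z hz hzr => hinf z (by omega) hzr)]
    ring
termination_by (m + 1 - y).toNat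
decreasing_by omega

-- the binary search returns the floor square root: a value m with lo ≤ m ≤ hi, m*m ≤ n < (m+1)*(m+1)
lemma pvIsqrtLoop_spec (n : Int) (fuel : Nat) (lo hi : Int)
    (hlo : 0 ≤ lo) (hle : lo ≤ hi) (hlon : lo * lo ≤ n) (hhin : n < (hi + 1) * (hi + 1))
    (hfuel : hi - lo ≤ fuel) :
    lo ≤ pvIsqrtLoop n fuel lo hi ∧ pvIsqrtLoop n fuel lo hi ≤ hi ∧
    pvIsqrtLoop n fuel lo hi * pvIsqrtLoop n fuel lo hi ≤ n ∧
    n < (pvIsqrtLoop n fuel lo hi + 1) * (pvIsqrtLoop n fuel lo hi + 1) := by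
  induction fuel generalizing lo hi with
  | zero =>
    have : lo = hi := by omega
    subst this
    rw [pvIsqrtLoop]
    exact ⟨le_rfl, le_rfl, hlon, hhin⟩
  | succ fuel ih =>
    rw [pvIsqrtLoop]
    split_ifs with h hm
    · have hmid := PySem.Int.floordiv_eq_ediv_of_pos (a := lo + hi + 1) (b := 2) (by omega)
      have hb : lo + 1 ≤ PySem.Int.floordiv (lo + hi + 1) 2 ∧
          PySem.Int.floordiv (lo + hi + 1) 2 ≤ hi := by rw [hmid]; omega
      obtain ⟨r1, r2, r3, r4⟩ := ih (PySem.Int.floordiv (lo + hi + 1) 2) hi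
        (by omega) (by omega) hm hhin (by omega)
      exact ⟨by omega, r2, r3, r4⟩
    · have hmid := PySem.Int.floordiv_eq_ediv_of_pos (a := lo + hi + 1) (b := 2) (by omega)
      have hb : lo + 1 ≤ PySem.Int.floordiv (lo + hi + 1) 2 ∧
          PySem.Int.floordiv (lo + hi + 1) 2 ≤ hi := by rw [hmid]; omega
      obtain ⟨r1, r2, r3, r4⟩ := ih lo (PySem.Int.floordiv (lo + hi + 1) 2 - 1)
        hlo (by omega) hlon (by simpa using not_le.mp hm) (by omega)
      exact ⟨r1, by omega, r3, r4⟩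
    · have : lo = hi := by omega
      subst this
      exact ⟨le_rfl, le_rfl, hlon, hhin⟩

-- column height: A's inner count over y ∈ [1, radius] equals B's binary-searched isqrt
lemma pvCol_eq (radius x : Int) (hx0 : 0 ≤ x) (hxr : x ≤ radius) :
    pvCnt radius x 1 = pvIsqrtLoop (radius * radius - x * x) radius.toNat 0 radius := by
  have hr : 0 ≤ radius := by omega
  obtain ⟨r1, r2, r3, r4⟩ := pvIsqrtLoop_spec (radius * radius - x * x) radius.toNat 0 radius
    le_rfl hr (by nlinarith) (by nlinarith) (by omega)
  set m := pvIsqrtLoop (radius * radius - x * x) radius.toNat 0 radius with hm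
  rw [pvCnt_run radius x m 1 r2 (by omega)
    (fun z hz hzm => by nlinarith)
    (fun z hz hzr => by nlinarith)]
  ring

-- A's outer loop equals B's fold over range(radius+1)
lemma pvOuterA_eq_foldl (radius : Int) (fuel : Nat) (x count : Int) (hx : 0 ≤ x)
    (hfuel : radius + 1 - x ≤ fuel) :
    pvOuterA radius fuel x count =
      (PySem.List.pyRange x (radius + 1) 1).foldl
        (fun total x => total + pvIsqrtLoop (radius * radius - x * x) radius.toNat 0 radius) count := by
  induction fuel generalizing x count with
  | zero =>
    rw [pvOuterA, PySem.List.pyRange_one_eq_nil (by omega), List.foldl_nil]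
  | succ fuel ih =>
    rw [pvOuterA]
    split_ifs with h
    · rw [PySem.List.pyRange_one_cons (by omega), List.foldl_cons,
        pvInnerA_eq radius x radius.toNat 1 count (by omega),
        pvCol_eq radius x hx h]
      exact ih (x + 1) _ (by omega) (by omega)
    · rw [PySem.List.pyRange_one_eq_nil (by omega), List.foldl_nil]

-- ===== VERDICT (by name: the statement is the Claim_ definition above) =====
theorem count_grid_points_spec : Claim_equal_count_grid_points := by
  intro radius _
  unfold Spec_count_grid_points count_grid_points count_grid_points_alt
  rw [pvOuterA_eq_foldl radius (radius + 1).toNat 0 0 le_rfl (by omega)]
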